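-- pv_equiv track=rewrite | github.com/web-bro-prd/Lottery | backend/pension_analysis.py | check_pension_rank
-- ===== SOURCE A (Python) =====
-- def check_pension_rank(
--     my_grp: int, my_num: str,
--     win_grp: int, win_num: str,
--     bonus_num: str = "",
-- ) -> int:
--     """
--     연금복권720+ 등수 판별
--     1등: 조 일치 + 6자리 모두 일치
--     2등: 조 불일치 + 6자리 모두 일치
--     3등: 앞 5자리 일치 (끝 1자리 다름)
--     4등: 앞 4자리 일치
--     5등: 앞 3자리 일치
--     6등: 앞 2자리 일치
--     7등: 끝 1자리 일치
--     0: 낙첨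
--     """
--     m = str(my_num).zfill(6)
--     w = str(win_num).zfill(6)
--
--     if m == w:
--         if my_grp == win_grp:
--             return 1
--         return 2
--
--     # 앞자리 일치 체크
--     for i in range(5, 0, -1):
--         if m[:i] == w[:i]:
--             return 8 - i  # 5→3등, 4→4등, 3→5등, 2→6등
--
--     # 끝자리 일치
--     if m[-1] == w[-1]:
--         return 7
--
--     return 0
-- ===== SOURCE B (Python) =====
-- def check_pension_rank(
--     my_grp: int, my_num: str,
--     win_grp: int, win_num: str,
--     bonus_num: str = "",
-- ) -> int:
--     m = str(my_num).zfill(6)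
--     w = str(win_num).zfill(6)
--     if m == w:
--         return 1 if my_grp == win_grp else 2
--     # single pass: length of the common leading prefix
--     p = 0
--     for a, b in zip(m, w):
--         if a != b:
--             break
--         p += 1
--     if p:
--         return 8 - min(p, 5)
--     return 7 if m[-1] == w[-1] else 0
-- ===== Notes on version B (the rewrite author's own statement) =====
-- stated objective: simpler
-- what changed: Replaces the descending loop of five slice-pair comparisons (m[:i]==w[:i], each rebuilding two prefixes) with a single zip pass that measures the common-prefix length p once and maps it to the rank by the formula 8-min(p,5), with the last-digit check only when p==0.
import Mathlib
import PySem

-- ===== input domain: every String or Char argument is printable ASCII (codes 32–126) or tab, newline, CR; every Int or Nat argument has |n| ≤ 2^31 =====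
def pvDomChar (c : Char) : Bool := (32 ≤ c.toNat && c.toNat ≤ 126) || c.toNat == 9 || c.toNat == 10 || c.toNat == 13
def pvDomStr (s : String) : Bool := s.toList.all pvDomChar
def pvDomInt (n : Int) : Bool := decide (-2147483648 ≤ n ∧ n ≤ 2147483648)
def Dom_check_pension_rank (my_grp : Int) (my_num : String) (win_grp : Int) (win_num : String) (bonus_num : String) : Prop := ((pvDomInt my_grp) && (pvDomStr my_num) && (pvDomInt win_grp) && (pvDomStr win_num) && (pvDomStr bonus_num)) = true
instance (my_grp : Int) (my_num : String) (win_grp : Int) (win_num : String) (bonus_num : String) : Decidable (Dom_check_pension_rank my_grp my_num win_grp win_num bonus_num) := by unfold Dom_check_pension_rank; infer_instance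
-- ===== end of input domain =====

-- B replaces A's descending loop of five slice comparisons with one pass measuring the
-- common-prefix length and a formula 8 - min(p,5); objective: simpler.

-- ===== PORT A =====
-- the for-loop `for i in range(5,0,-1): if m[:i] == w[:i]: return 8 - i`
def pvLoopA (m w : List Char) : List Int → Option Int
  | [] => none
  | i :: rest =>
    if PySem.List.slice m none (some i) = PySem.List.slice w none (some i) then some (8 - i)
    else pvLoopA m w rest

def check_pension_rank (my_grp : Int) (my_num : String) (win_grp : Int) (win_num : String) (bonus_num : String) : Int :=
  let m := PySem.Chars.zfill my_num.toList 6
  let w := PySem.Chars.zfill win_num.toList 6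
  if m = w then
    if my_grp = win_grp then 1 else 2
  else
    match pvLoopA m w (PySem.List.pyRange 5 0 (-1)) with
    | some r => r
    | none => if m.getLast? = w.getLast? then 7 else 0

-- ===== PORT B =====
-- `p = 0; for a, b in zip(m, w): if a != b: break; p += 1`
def pvCp : List Char → List Char → Nat
  | a :: as, b :: bs => if a = b then pvCp as bs + 1 else 0
  | _, _ => 0

def check_pension_rank_alt (my_grp : Int) (my_num : String) (win_grp : Int) (win_num : String) (bonus_num : String) : Int :=
  let m := PySem.Chars.zfill my_num.toList 6
  let w := PySem.Chars.zfill win_num.toList 6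
  if m = w then
    if my_grp = win_grp then 1 else 2
  else
    let p := pvCp m w
    if p ≠ 0 then 8 - min (p : Int) 5
    else if m.getLast? = w.getLast? then 7 else 0

-- ===== PRECONDITION & SPEC =====
def Spec_check_pension_rank (my_grp : Int) (my_num : String) (win_grp : Int) (win_num : String) (bonus_num : String) (out : Int) : Prop := out = check_pension_rank_alt my_grp my_num win_grp win_num bonus_num
instance (my_grp : Int) (my_num : String) (win_grp : Int) (win_num : String) (bonus_num : String) (out : Int) : Decidable (Spec_check_pension_rank my_grp my_num win_grp win_num bonus_num out) := by unfold Spec_check_pension_rank; infer_instance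

-- ===== CLAIM (what is proved, stated in full; the proofs are below) =====
def Claim_equal_check_pension_rank : Prop := ∀ (my_grp : Int) (my_num : String) (win_grp : Int) (win_num : String) (bonus_num : String), Dom_check_pension_rank my_grp my_num win_grp win_num bonus_num → Spec_check_pension_rank my_grp my_num win_grp win_num bonus_num (check_pension_rank my_grp my_num win_grp win_num bonus_num)

-- ===== LEMMAS AND PROOFS =====

-- m[:i] == w[:i]  ↔  the common prefix has length ≥ i  (for i within both lengths)
theorem take_eq_iff_cp (i : Nat) : ∀ (m w : List Char), i ≤ m.length → i ≤ w.length →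
    (List.take i m = List.take i w ↔ i ≤ pvCp m w) := by
  induction i with
  | zero => intro m w _ _; simp
  | succ i ih =>
    intro m w hm hw
    match m, w with
    | a :: as, b :: bs =>
      simp only [List.take_succ_cons, List.cons.injEq, pvCp]
      by_cases hab : a = b
      · subst hab
        simp only [if_true, true_and]
        rw [ih as bs (by simpa using hm) (by simpa using hw)]
        omega
      · simp [hab]

theorem pyRange51 : PySem.List.pyRange 5 0 (-1) = ([5, 4, 3, 2, 1] : List Int) := by decide

theorem slice_take (m : List Char) (i : Nat) :
    PySem.List.slice m none (some (i : Int)) = List.take i m := by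
  simpa using PySem.List.slice_to_natCast (xs := m) (b := i)

theorem loopA_eq (m w : List Char) (hm : 6 ≤ m.length) (hw : 6 ≤ w.length) :
    pvLoopA m w [5, 4, 3, 2, 1] =
      (if pvCp m w ≠ 0 then some (8 - min (pvCp m w : Int) 5) else none) := by
  have h : ∀ i : Nat, 1 ≤ i → i ≤ 5 →
      (PySem.List.slice m none (some (i : Int)) = PySem.List.slice w none (some (i : Int)) ↔
        i ≤ pvCp m w) := by
    intro i _ h5
    rw [slice_take, slice_take]
    exact take_eq_iff_cp i m w (by omega) (by omega)
  have h5 := h 5 (by omega) (by omega)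
  have h4 := h 4 (by omega) (by omega)
  have h3 := h 3 (by omega) (by omega)
  have h2 := h 2 (by omega) (by omega)
  have h1 := h 1 (by omega) (by omega)
  simp only [Nat.cast_ofNat, Nat.cast_one] at h5 h4 h3 h2 h1
  set p := pvCp m w with hp
  simp only [pvLoopA]
  by_cases c5 : 5 ≤ p
  · rw [if_pos (h5.mpr c5)]
    have h5m : min (p : Int) 5 = 5 := by omega
    simp [h5m]; omega
  · rw [if_neg (fun hc => c5 (h5.mp hc))]
    by_cases c4 : 4 ≤ p
    · rw [if_pos (h4.mpr c4)]
      have : min (p : Int) 5 = 4 := by omega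
      simp [this]; omega
    · rw [if_neg (fun hc => c4 (h4.mp hc))]
      by_cases c3 : 3 ≤ p
      · rw [if_pos (h3.mpr c3)]
        have : min (p : Int) 5 = 3 := by omega
        simp [this]; omega
      · rw [if_neg (fun hc => c3 (h3.mp hc))]
        by_cases c2 : 2 ≤ p
        · rw [if_pos (h2.mpr c2)]
          have : min (p : Int) 5 = 2 := by omega
          simp [this]; omega
        · rw [if_neg (fun hc => c2 (h2.mp hc))]
          by_cases c1 : 1 ≤ p
          · rw [if_pos (h1.mpr c1)]
            have h1m : min (p : Int) 5 = 1 := by omega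
            simp [h1m]; omega
          · rw [if_neg (fun hc => c1 (h1.mp hc))]
            have : p = 0 := by omega
            simp [this]

-- ===== VERDICT (by name: the statement is the Claim_ definition above) =====
theorem check_pension_rank_spec : Claim_equal_check_pension_rank := by
  intro my_grp my_num win_grp win_num bonus_num _
  unfold Spec_check_pension_rank check_pension_rank check_pension_rank_alt
  set m := PySem.Chars.zfill my_num.toList 6 with hm
  set w := PySem.Chars.zfill win_num.toList 6 with hw
  have hml : 6 ≤ m.length := by rw [hm, PySem.Chars.length_zfill]; omega
  have hwl : 6 ≤ w.length := by rw [hw, PySem.Chars.length_zfill]; omega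
  by_cases heq : m = w
  · simp [heq]
  · simp only [if_neg heq, pyRange51, loopA_eq m w hml hwl]
    by_cases hp : pvCp m w ≠ 0 <;> simp [hp]
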